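-- pv_equiv track=rewrite | github.com/MQTT-Broker-H5/MQTT-Broker | MQTT Broker/MQTTHelper.py | LeftBitwiseCheckFlags
-- ===== SOURCE A (Python) =====
-- def LeftBitwiseCheckFlags(flags):
--     reservedBits = []
--     for kth in range(1,9):
--         if flags &(1 << (kth -1)):
--             reservedBits.append(1)
--         else:
--             reservedBits.append(0)
--     return reservedBits
-- ===== SOURCE B (Python) =====
-- def LeftBitwiseCheckFlags(flags):
--     s = format(flags & 0xFF, '08b')
--     return [int(c) for c in reversed(s)]
-- ===== Notes on version B (the rewrite author's own statement) =====
-- stated objective: idiomatic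
-- what changed: Replaces the per-bit shift-and-mask loop with one mask (flags & 0xFF), one '08b' string formatting, and a character-wise parse of the reversed string.
import Mathlib
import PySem

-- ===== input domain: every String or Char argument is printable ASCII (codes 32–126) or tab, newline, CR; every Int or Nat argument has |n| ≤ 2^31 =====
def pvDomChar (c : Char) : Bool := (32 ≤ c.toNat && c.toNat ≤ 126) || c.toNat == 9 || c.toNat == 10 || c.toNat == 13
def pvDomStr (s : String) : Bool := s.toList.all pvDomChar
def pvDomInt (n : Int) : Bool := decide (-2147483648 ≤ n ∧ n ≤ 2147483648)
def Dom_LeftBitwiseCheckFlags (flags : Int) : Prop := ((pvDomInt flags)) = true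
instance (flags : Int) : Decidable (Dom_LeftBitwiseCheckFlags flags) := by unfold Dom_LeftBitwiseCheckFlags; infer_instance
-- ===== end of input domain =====

-- B formats the low byte (flags & 0xFF) as an '08b' binary string once and parses the
-- reversed characters, instead of A's per-bit shift-and-mask loop; objective: idiomatic, no speed claim.


-- ===== PORT A =====
-- Python: `1 << (kth - 1)` with kth ∈ range(1, 9), so the shift count kth-1 is in 0..7 and .toNat is exact.
-- Python truthiness of `flags & mask` with mask > 0: the result is ≥ 0, so truthy ↔ ≠ 0.
def LeftBitwiseCheckFlags (flags : Int) : List Int :=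
  (PySem.List.pyRange 1 9 1).foldl
    (fun reservedBits kth =>
      if PySem.Int.band flags ((1 : Int) <<< (kth - 1).toNat) ≠ 0 then
        reservedBits ++ [1]
      else
        reservedBits ++ [0]) []

-- ===== PORT B =====
-- format(m, '08b') for m ≥ 0 (here m = flags & 0xFF ≥ 0): binary digits of m (PySem.Int.toBinChars)
-- left-padded with '0' to width 8 — exact on this domain.
def pvFormat08b (m : Int) : List Char :=
  let t := PySem.Int.toBinChars m
  List.replicate (8 - t.length) '0' ++ t

-- int(c) for a single digit char c ∈ {'0','1'} is c.toNat - 48 (exact on that domain).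
def LeftBitwiseCheckFlags_alt (flags : Int) : List Int :=
  let s := pvFormat08b (PySem.Int.band flags 255)
  s.reverse.map (fun c => ((c.toNat : Int) - 48))

-- ===== PRECONDITION & SPEC =====
def Spec_LeftBitwiseCheckFlags (flags : Int) (out : List Int) : Prop := out = LeftBitwiseCheckFlags_alt flags
instance (flags : Int) (out : List Int) : Decidable (Spec_LeftBitwiseCheckFlags flags out) := by unfold Spec_LeftBitwiseCheckFlags; infer_instance

-- ===== CLAIM (what is proved, stated in full; the proofs are below) =====
def Claim_equal_LeftBitwiseCheckFlags : Prop := ∀ (flags : Int), Dom_LeftBitwiseCheckFlags flags → Spec_LeftBitwiseCheckFlags flags (LeftBitwiseCheckFlags flags)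

-- ===== LEMMAS AND PROOFS =====
lemma pv_and_pow_ne (x k : Nat) : (x &&& 2 ^ k ≠ 0) ↔ x.testBit k = true := by
  rw [Nat.and_two_pow]
  rcases h : x.testBit k <;> simp

set_option maxRecDepth 10000 in
lemma pv_byte_compl : ∀ s < 256, ∀ k < 8, (255 - s).testBit k = ! s.testBit k := by decide

lemma pv_testBit255 (k : Nat) (hk : k < 8) : Nat.testBit 255 k = true := by
  have := Nat.testBit_two_pow_sub_one 8 k
  simpa [hk] using this

lemma band255_spec (flags : Int) :
    0 ≤ PySem.Int.band flags 255 ∧ (PySem.Int.band flags 255).toNat < 256 := by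
  unfold PySem.Int.band
  by_cases h1 : (0:Int) ≤ flags <;> simp [h1]
  · have := Nat.and_le_right (n := flags.toNat) (m := 255)
    omega
  · have := Nat.and_le_right (n := 255) (m := (-flags).toNat - 1)
    omega

lemma band_pow_iff (flags : Int) (k : Nat) (hk : k < 8) :
    (PySem.Int.band flags ((2:Int) ^ k) ≠ 0 ↔ (PySem.Int.band flags 255).toNat &&& 2 ^ k ≠ 0) := by
  have h2k : ((2:Int) ^ k) = ((2 ^ k : Nat) : Int) := by push_cast; ring
  have h255 : ((255:Int)) = ((255:Nat):Int) := rfl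
  rw [h2k, h255]
  unfold PySem.Int.band
  by_cases h1 : (0:Int) ≤ flags
  · rw [if_pos h1, if_pos h1, if_pos (by positivity), if_pos (by positivity)]
    rw [Int.toNat_natCast, Int.toNat_natCast, Int.toNat_natCast]
    rw [pv_and_pow_ne, Nat.cast_ne_zero, pv_and_pow_ne, Nat.testBit_and, pv_testBit255 k hk]
    simp
  · rw [if_neg h1, if_neg h1, if_pos (by positivity), if_pos (by positivity)]
    rw [Int.toNat_natCast, Int.toNat_natCast, Int.toNat_natCast]
    set m := (-flags - 1).toNat with hm
    have hbit255 : ((255:Nat) &&& m).testBit k = m.testBit k := by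
      rw [Nat.testBit_and, pv_testBit255 k hk]; simp
    have hcompl := pv_byte_compl ((255:Nat) &&& m) (by have : (255:Nat) &&& m ≤ 255 := Nat.and_le_left; omega) k hk
    rw [Nat.cast_ne_zero, pv_and_pow_ne, hcompl, hbit255, Nat.two_pow_and]
    rcases h : m.testBit k <;> simp

set_option maxRecDepth 100000 in
set_option maxHeartbeats 2000000 in
lemma pv_core : ∀ r : Nat, r < 256 →
    [ite (r &&& 2^0 ≠ 0) (1:Int) 0, ite (r &&& 2^1 ≠ 0) 1 0, ite (r &&& 2^2 ≠ 0) 1 0,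
     ite (r &&& 2^3 ≠ 0) 1 0, ite (r &&& 2^4 ≠ 0) 1 0, ite (r &&& 2^5 ≠ 0) 1 0,
     ite (r &&& 2^6 ≠ 0) 1 0, ite (r &&& 2^7 ≠ 0) 1 0] =
    (pvFormat08b ((r : Nat) : Int)).reverse.map (fun c => ((c.toNat : Int) - 48)) := by
  decide


-- ===== VERDICT (by name: the statement is the Claim_ definition above) =====
theorem LeftBitwiseCheckFlags_spec : Claim_equal_LeftBitwiseCheckFlags := by
  intro flags _
  unfold Spec_LeftBitwiseCheckFlags
  obtain ⟨hnn, hlt⟩ := band255_spec flags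
  have hback : ((PySem.Int.band flags 255).toNat : Int) = PySem.Int.band flags 255 := Int.toNat_of_nonneg hnn
  have halt : LeftBitwiseCheckFlags_alt flags
      = (pvFormat08b (((PySem.Int.band flags 255).toNat : Nat) : Int)).reverse.map (fun c => ((c.toNat : Int) - 48)) := by
    unfold LeftBitwiseCheckFlags_alt
    rw [hback]
  rw [halt]
  have e : ∀ k, k < 8 → (PySem.Int.band flags ((2:Int) ^ k) ≠ 0 ↔ (PySem.Int.band flags 255).toNat &&& 2 ^ k ≠ 0) := band_pow_iff flags
  have hpr : PySem.List.pyRange 1 9 1 = [1,2,3,4,5,6,7,8] := by decide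
  unfold LeftBitwiseCheckFlags
  have hfun : (fun (acc : List Int) (kth : Int) =>
        if PySem.Int.band flags ((1:Int) <<< (((kth - 1).toNat : Nat) : Int)) ≠ 0 then acc ++ [1] else acc ++ [0])
      = (fun acc kth => acc ++ [if PySem.Int.band flags ((1:Int) <<< (((kth - 1).toNat : Nat) : Int)) ≠ 0 then (1:Int) else 0]) := by
    funext acc kth
    split_ifs <;> rfl
  rw [hfun, PySem.List.foldl_append_singleton_eq_map, hpr]
  simp only [List.map, List.nil_append]
  have s0 : (1:Int) <<< (((((1:Int) - 1).toNat : Nat)) : Int) = (2:Int)^0 := by decide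
  have s1 : (1:Int) <<< (((((2:Int) - 1).toNat : Nat)) : Int) = (2:Int)^1 := by decide
  have s2 : (1:Int) <<< (((((3:Int) - 1).toNat : Nat)) : Int) = (2:Int)^2 := by decide
  have s3 : (1:Int) <<< (((((4:Int) - 1).toNat : Nat)) : Int) = (2:Int)^3 := by decide
  have s4 : (1:Int) <<< (((((5:Int) - 1).toNat : Nat)) : Int) = (2:Int)^4 := by decide
  have s5 : (1:Int) <<< (((((6:Int) - 1).toNat : Nat)) : Int) = (2:Int)^5 := by decide
  have s6 : (1:Int) <<< (((((7:Int) - 1).toNat : Nat)) : Int) = (2:Int)^6 := by decide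
  have s7 : (1:Int) <<< (((((8:Int) - 1).toNat : Nat)) : Int) = (2:Int)^7 := by decide
  rw [s0, s1, s2, s3, s4, s5, s6, s7]
  simp only [e 0 (by norm_num), e 1 (by norm_num), e 2 (by norm_num), e 3 (by norm_num),
             e 4 (by norm_num), e 5 (by norm_num), e 6 (by norm_num), e 7 (by norm_num)]
  exact pv_core _ hlt
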